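-- pv_equiv track=rewrite | github.com/eadu/prelab03 | simpleTasks.py | getStreakProduct
-- ===== SOURCE A (Python) =====
-- def getStreakProduct(sequence, maxSize, product):
--     equalProduct = []
--
--     for i in range(2, maxSize + 1):
--         for j in range(len(sequence) - (i - 1)):
--             subSeq = sequence[j: i + j]
--             prod = 1
--             for num in subSeq:
--                 prod *= int(num)
--             if prod == product:
--                 equalProduct.append([subSeq, j])
--     equalProduct.sort(key=lambda x:x[1])
--
--     for i in range(len(equalProduct)):
--         equalProduct[i] = equalProduct[i][0]
--
--     return equalProduct
-- ===== SOURCE B (Python) =====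
-- def getStreakProduct(sequence, maxSize, product):
--     # One pass per start index with a running product: windows come out
--     # ordered by start index, then size, which is exactly A's stable sort
--     # by start of its size-major enumeration.
--     n = len(sequence)
--     out = []
--     for j in range(n):
--         prod = sequence[j]
--         for k in range(j + 1, min(j + maxSize, n)):
--             prod *= sequence[k]
--             if prod == product:
--                 out.append(sequence[j:k + 1])
--     return out
-- ===== Notes on version B (the rewrite author's own statement) =====
-- stated objective: faster
-- what changed: Replaces the size-major enumeration that re-multiplies every window and then stable-sorts by start index with a start-major sweep keeping a running product per start, which emits windows already in the final order.
import Mathlib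
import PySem

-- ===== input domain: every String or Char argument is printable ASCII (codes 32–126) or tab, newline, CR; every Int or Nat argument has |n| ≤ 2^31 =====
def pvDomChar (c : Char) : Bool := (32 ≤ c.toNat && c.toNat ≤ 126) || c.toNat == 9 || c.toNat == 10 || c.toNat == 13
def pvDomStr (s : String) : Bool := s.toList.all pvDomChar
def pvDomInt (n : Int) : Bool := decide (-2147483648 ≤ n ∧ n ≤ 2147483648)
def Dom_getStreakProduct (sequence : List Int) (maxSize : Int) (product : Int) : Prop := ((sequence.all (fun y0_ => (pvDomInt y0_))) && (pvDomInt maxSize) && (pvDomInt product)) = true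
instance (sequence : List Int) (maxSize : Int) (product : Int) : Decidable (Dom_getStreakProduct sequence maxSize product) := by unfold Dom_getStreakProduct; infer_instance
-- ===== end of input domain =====

-- B replaces A's size-major enumeration (which re-multiplies every window and then
-- stable-sorts by start index) by a start-major sweep with a running product per start.

-- ===== PORT A =====
def getStreakProduct (sequence : List Int) (maxSize : Int) (product : Int) : List (List Int) :=
  let equalProduct : List (List Int × Int) :=
    (PySem.List.pyRange 2 (maxSize + 1)).foldl (fun acc i =>
      (PySem.List.pyRange 0 ((sequence.length : Int) - (i - 1))).foldl (fun acc j =>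
        let subSeq := PySem.List.slice sequence (some j) (some (i + j))
        let prod := subSeq.foldl (fun p num => p * num) 1
        if prod = product then acc ++ [(subSeq, j)] else acc) acc) []
  let sortedL := PySem.List.sorted equalProduct (fun x => x.2)
  sortedL.map (fun x => x.1)

-- ===== PORT B =====
def getStreakProduct_alt (sequence : List Int) (maxSize : Int) (product : Int) : List (List Int) :=
  let n : Int := sequence.length
  (PySem.List.pyRange 0 n).foldl (fun out j =>
    ((PySem.List.pyRange (j + 1) (min (j + maxSize) n)).foldl
      (fun (s : Int × List (List Int)) k =>
        let p := s.1 * PySem.List.pyGetD sequence k 0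
        if p = product then (p, s.2 ++ [PySem.List.slice sequence (some j) (some (k + 1))])
        else (p, s.2))
      (PySem.List.pyGetD sequence j 0, out)).2) []

-- ===== PRECONDITION & SPEC =====
def Spec_getStreakProduct (sequence : List Int) (maxSize : Int) (product : Int) (out : List (List Int)) : Prop := out = getStreakProduct_alt sequence maxSize product
instance (sequence : List Int) (maxSize : Int) (product : Int) (out : List (List Int)) : Decidable (Spec_getStreakProduct sequence maxSize product out) := by unfold Spec_getStreakProduct; infer_instance

-- ===== CLAIM (what is proved, stated in full; the proofs are below) =====
def Claim_equal_getStreakProduct : Prop := ∀ (sequence : List Int) (maxSize : Int) (product : Int), Dom_getStreakProduct sequence maxSize product → Spec_getStreakProduct sequence maxSize product (getStreakProduct sequence maxSize product)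

-- ===== LEMMAS AND PROOFS =====


theorem insertBy_middle {α : Type} (before : α → α → Bool) (e : α) :
    ∀ (xs ys : List α), (∀ x ∈ xs, before e x = false) → (∀ y ∈ ys, before e y = true) →
      PySem.List.insertBy before e (xs ++ ys) = xs ++ e :: ys := by
  intro xs
  induction xs with
  | nil =>
    intro ys _ hy
    cases ys with
    | nil => rfl
    | cons y ys' => simp [PySem.List.insertBy, hy y (by simp)]
  | cons x xs' ih =>
    intro ys hx hy
    simp only [List.cons_append, PySem.List.insertBy, hx x (by simp)]
    simp only [Bool.false_eq_true, if_false]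
    have := ih ys (fun z hz => hx z (by simp [hz])) hy
    simp at this ⊢
    rw [this]

def pvBuckets (n : Nat) (l : List (List Int × Int)) : List (List Int × Int) :=
  (List.range n).flatMap (fun (u : Nat) => l.filter (fun e => e.2 == (u : Int)))

theorem insert_buckets (n : Nat) (l : List (List Int × Int)) (x : List Int × Int)
    (hx : 0 ≤ x.2 ∧ x.2 < n) :
    PySem.List.insertBy (fun a b => decide (a.2 < b.2)) x (pvBuckets n l)
      = pvBuckets n (l ++ [x]) := by
  obtain ⟨hx0, hxn⟩ := hx
  obtain ⟨t, htx⟩ : ∃ t : Nat, (t : Int) = x.2 := ⟨x.2.toNat, by omega⟩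
  have htn : t < n := by exact_mod_cast htx ▸ hxn
  have hsplit : List.range n = List.range (t+1) ++ List.range' (t+1) (n-(t+1)) := by
    have h := List.range'_append (s:=0) (m:=t+1) (n:=n-(t+1)) (step:=1)
    simp only [Nat.zero_add, Nat.one_mul] at h
    rw [show (t+1)+(n-(t+1)) = n from by omega] at h
    rw [List.range_eq_range', List.range_eq_range', ← h]
  unfold pvBuckets
  rw [hsplit, List.flatMap_append, List.flatMap_append]
  have hmid := insertBy_middle (fun a b => decide (a.2 < b.2)) x
    ((List.range (t+1)).flatMap (fun (u : Nat) => l.filter (fun e => e.2 == (u : Int))))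
    ((List.range' (t+1) (n-(t+1))).flatMap (fun (u : Nat) => l.filter (fun e => e.2 == (u : Int))))
    (by
      intro y hy
      simp only [List.mem_flatMap, List.mem_range] at hy
      obtain ⟨u, hu, hyf⟩ := hy
      have := List.of_mem_filter hyf
      simp only [beq_iff_eq] at this
      simp only [decide_eq_false_iff_not, not_lt, this]
      omega)
    (by
      intro y hy
      simp only [List.mem_flatMap, List.mem_range'] at hy
      obtain ⟨u, hu, hyf⟩ := hy
      have := List.of_mem_filter hyf
      simp only [beq_iff_eq] at this
      simp only [decide_eq_true_eq, this]
      omega)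
  rw [hmid]
  have hY : ∀ u ∈ List.range' (t+1) (n-(t+1)),
      (l ++ [x]).filter (fun e => e.2 == (u : Int)) = l.filter (fun e => e.2 == (u : Int)) := by
    intro u hu
    rw [List.filter_append]
    have : ([x].filter (fun e => e.2 == (u : Int))) = [] := by
      simp only [List.mem_range'] at hu
      simp; omega
    rw [this, List.append_nil]
  rw [List.flatMap_congr hY]
  have hXsplit : List.range (t+1) = List.range t ++ [t] := List.range_succ
  rw [hXsplit, List.flatMap_append, List.flatMap_append]
  have hX : ∀ u ∈ List.range t,
      (l ++ [x]).filter (fun e => e.2 == (u : Int)) = l.filter (fun e => e.2 == (u : Int)) := by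
    intro u hu
    rw [List.filter_append]
    have : ([x].filter (fun e => e.2 == (u : Int))) = [] := by
      simp only [List.mem_range] at hu
      simp; omega
    rw [this, List.append_nil]
  rw [List.flatMap_congr hX]
  have hx1 : [x].filter (fun e => e.2 == (t : Int)) = [x] := by
    simp [← htx]
  simp [hx1, List.append_assoc]

theorem sorted_eq_buckets (n : Nat) :
    ∀ (l l₀ : List (List Int × Int)), (∀ e ∈ l, 0 ≤ e.2 ∧ e.2 < n) →
      l.foldl (fun acc x => PySem.List.insertBy (fun a b => decide (a.2 < b.2)) x acc) (pvBuckets n l₀)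
        = pvBuckets n (l₀ ++ l) := by
  intro l
  induction l with
  | nil => intro l₀ _; simp
  | cons x tl ih =>
    intro l₀ hkeys
    simp only [List.foldl_cons]
    rw [insert_buckets n l₀ x (hkeys x (by simp))]
    rw [ih (l₀ ++ [x]) (fun e he => hkeys e (by simp [he]))]
    simp

theorem sorted_key2_eq_buckets (n : Nat) (l : List (List Int × Int))
    (hkeys : ∀ e ∈ l, 0 ≤ e.2 ∧ e.2 < n) :
    PySem.List.sorted l (fun e => e.2) = pvBuckets n l := by
  rw [PySem.List.sorted_eq_foldl_insertBy]
  have h0 : pvBuckets n ([] : List (List Int × Int)) = [] := by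
    simp [pvBuckets]
  have h := sorted_eq_buckets n l [] hkeys
  rw [h0] at h
  simpa using h

theorem slice_self (seq : List Int) (j : Int) :
    PySem.List.slice seq (some j) (some j) = [] := by
  simp [PySem.List.slice]

theorem slice_snoc (seq : List Int) (j a : Int) (h0 : 0 ≤ j) (hja : j ≤ a) (ha : a < seq.length) :
    PySem.List.slice seq (some j) (some (a+1))
      = PySem.List.slice seq (some j) (some a) ++ [PySem.List.pyGetD seq a 0] := by
  obtain ⟨jn, rfl⟩ : ∃ jn : Nat, (jn : Int) = j := ⟨j.toNat, by omega⟩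
  obtain ⟨an, rfl⟩ : ∃ an : Nat, (an : Int) = a := ⟨a.toNat, by omega⟩
  have han : an < seq.length := by exact_mod_cast ha
  have h1 : ((an : Int) + 1) = ((an + 1 : Nat) : Int) := by push_cast; ring
  rw [h1, PySem.List.slice_natCast, PySem.List.slice_natCast]
  rw [PySem.List.pyGetD_eq_getElem seq 0 (by omega) (by exact_mod_cast ha)]
  have h2 : an + 1 - jn = (an - jn) + 1 := by omega
  rw [h2, List.take_add_one]
  congr 1
  have h3 : (seq.drop jn)[an - jn]? = some seq[(an : Int).toNat] := by
    rw [List.getElem?_drop]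
    have : jn + (an - jn) = an := by omega
    rw [this]
    rw [List.getElem?_eq_getElem han]
    simp
  rw [h3]
  rfl

def pvSeg (seq : List Int) (j b : Int) : Int := (PySem.List.slice seq (some j) (some b)).prod

theorem pvSeg_succ (seq : List Int) (j a : Int) (h0 : 0 ≤ j) (hja : j ≤ a) (ha : a < seq.length) :
    pvSeg seq j (a+1) = pvSeg seq j a * PySem.List.pyGetD seq a 0 := by
  unfold pvSeg
  rw [slice_snoc seq j a h0 hja ha]
  simp

theorem pvSeg_single (seq : List Int) (j : Int) (h0 : 0 ≤ j) (hj : j < seq.length) :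
    pvSeg seq j (j+1) = PySem.List.pyGetD seq j 0 := by
  rw [pvSeg_succ seq j j h0 le_rfl hj]
  unfold pvSeg
  rw [slice_self]
  simp

theorem pyRange_one_nil (a b : Int) (h : b ≤ a) : PySem.List.pyRange a b = [] := by
  simp [PySem.List.pyRange]; omega

theorem pvBinner (seq : List Int) (product j : Int) (h0 : 0 ≤ j) :
    ∀ (m : Nat) (a b : Int), b - a ≤ m → j < a → b ≤ (seq.length : Int) →
      ∀ acc : List (List Int),
      (PySem.List.pyRange a b).foldl
        (fun (s : Int × List (List Int)) k =>
          if s.1 * PySem.List.pyGetD seq k 0 = product then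
            (s.1 * PySem.List.pyGetD seq k 0, s.2 ++ [PySem.List.slice seq (some j) (some (k + 1))])
          else (s.1 * PySem.List.pyGetD seq k 0, s.2))
        (pvSeg seq j a, acc)
      = (pvSeg seq j (max a b),
         acc ++ ((PySem.List.pyRange a b).filter
             (fun k => decide (pvSeg seq j (k+1) = product))).map
           (fun k => PySem.List.slice seq (some j) (some (k + 1)))) := by
  intro m
  induction m with
  | zero =>
    intro a b hm hja hb acc
    rw [pyRange_one_nil a b (by omega)]
    simp [show max a b = a by omega]
  | succ m ih =>
    intro a b hm hja hb acc
    by_cases hab : b ≤ a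
    · rw [pyRange_one_nil a b hab]
      simp [show max a b = a by omega]
    · replace hab : a < b := by omega
      rw [PySem.List.pyRange_one_cons hab, List.foldl_cons, List.filter_cons]
      dsimp only
      have hstep : pvSeg seq j a * PySem.List.pyGetD seq a 0 = pvSeg seq j (a+1) :=
        (pvSeg_succ seq j a h0 (by omega) (by omega)).symm
      have hmax : max a b = max (a+1) b := by omega
      rw [hstep]
      by_cases hc : pvSeg seq j (a+1) = product
      · rw [if_pos hc, ih (a+1) b (by omega) (by omega) hb (acc ++ [PySem.List.slice seq (some j) (some (a+1))])]
        simp [hc, hmax, List.append_assoc]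
      · rw [if_neg hc, ih (a+1) b (by omega) (by omega) hb acc]
        simp [hc, hmax]


theorem pyRange_map_add (a b c : Int) :
    PySem.List.pyRange (a + c) (b + c) = (PySem.List.pyRange a b).map (· + c) := by
  simp only [PySem.List.pyRange]
  have h1 : ¬ ((1:Int) = 0) := by omega
  have h2 : a + c < b + c ↔ a < b := by omega
  have h3 : b + c - (a + c) + 1 - 1 = b - a + 1 - 1 := by ring
  simp only [h1, if_false, h2, h3, if_true, show (0:Int) < 1 by omega]
  split_ifs with h
  · rw [List.map_map]; apply List.map_congr_left; intro k _; dsimp; ring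
  · rfl
theorem filter_pyRange_lt (a b u : Int) (c : Int → Bool) :
    (PySem.List.pyRange a b).filter (fun i => decide (i < u) && c i)
      = (PySem.List.pyRange a (min b u)).filter c := by
  by_cases hb : b ≤ u
  · have : min b u = b := by omega
    rw [this]
    apply List.filter_congr
    intro i hi
    have := PySem.List.mem_pyRange_one.mp hi
    simp [show i < u by omega]
  · by_cases ha : u ≤ a
    · have h1 : PySem.List.pyRange a (min b u) = [] := by
        simp [PySem.List.pyRange]; omega
      rw [h1]
      simp only [List.filter_nil]
      rw [List.filter_eq_nil_iff]
      intro i hi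
      have := PySem.List.mem_pyRange_one.mp hi
      simp; omega
    · have hmin : min b u = u := by omega
      rw [hmin]
      rw [PySem.List.pyRange_one_append a u b (by omega) (by omega), List.filter_append]
      have h2 : (PySem.List.pyRange u b).filter (fun i => decide (i < u) && c i) = [] := by
        rw [List.filter_eq_nil_iff]
        intro i hi
        have := PySem.List.mem_pyRange_one.mp hi
        simp; omega
      rw [h2, List.append_nil]
      apply List.filter_congr
      intro i hi
      have := PySem.List.mem_pyRange_one.mp hi
      simp [show i < u by omega]

theorem filter_pyRange_eq_single (a b t : Int) :
    (PySem.List.pyRange a b).filter (fun i => i == t)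
      = if a ≤ t ∧ t < b then [t] else [] := by
  split_ifs with h
  · rw [PySem.List.pyRange_one_append a t b (by omega) (by omega), List.filter_append,
      PySem.List.pyRange_one_cons (by omega : t < b)]
    have h1 : (PySem.List.pyRange a t).filter (fun i => i == t) = [] := by
      rw [List.filter_eq_nil_iff]; intro i hi
      have := PySem.List.mem_pyRange_one.mp hi
      simp; omega
    have h2 : (PySem.List.pyRange (t+1) b).filter (fun i => i == t) = [] := by
      rw [List.filter_eq_nil_iff]; intro i hi
      have := PySem.List.mem_pyRange_one.mp hi
      simp; omega
    simp [h1, h2]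
  · rw [List.filter_eq_nil_iff]; intro i hi
    have := PySem.List.mem_pyRange_one.mp hi
    simp; omega

theorem flatMap_ite_singleton {α β : Type} (l : List α) (p : α → Prop) [DecidablePred p] (f : α → β) :
    l.flatMap (fun x => if p x then [f x] else [])
      = (l.filter (fun x => decide (p x))).map f := by
  induction l with
  | nil => rfl
  | cons x t ih => by_cases h : p x <;> simp [h, ih]

-- the canonical row of hits for start index t : both ports normalise to this
def pvRow (seq : List Int) (M P t : Int) : List (List Int) :=
  ((PySem.List.pyRange 2 (min (M + 1) ((seq.length : Int) - t + 1))).filter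
      (fun i => decide (pvSeg seq t (i + t) = P))).map
    (fun i => PySem.List.slice seq (some t) (some (i + t)))

-- ===== B side =====
theorem B_eq_flat (seq : List Int) (M P : Int) :
    getStreakProduct_alt seq M P
      = (PySem.List.pyRange 0 (seq.length : Int)).flatMap (fun t => pvRow seq M P t) := by
  unfold getStreakProduct_alt
  dsimp only
  have hbody : ∀ (out : List (List Int)) (j : Int), j ∈ PySem.List.pyRange 0 (seq.length : Int) →
      ((PySem.List.pyRange (j + 1) (min (j + M) (seq.length : Int))).foldl
        (fun (s : Int × List (List Int)) k =>
          if s.1 * PySem.List.pyGetD seq k 0 = P then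
            (s.1 * PySem.List.pyGetD seq k 0, s.2 ++ [PySem.List.slice seq (some j) (some (k + 1))])
          else (s.1 * PySem.List.pyGetD seq k 0, s.2))
        (PySem.List.pyGetD seq j 0, out)).2 = out ++ pvRow seq M P j := by
    intro out j hj
    obtain ⟨hj0, hjn⟩ := PySem.List.mem_pyRange_one.mp hj
    rw [← pvSeg_single seq j hj0 hjn]
    rw [pvBinner seq P j hj0 (min (j + M) (seq.length : Int) - (j+1)).toNat (j+1)
      (min (j + M) (seq.length : Int)) (by omega) (by omega) (by omega) out]
    dsimp only
    have hrange : PySem.List.pyRange (j+1) (min (j + M) (seq.length : Int))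
        = (PySem.List.pyRange 2 (min (M + 1) ((seq.length : Int) - j + 1))).map (· + (j - 1)) := by
      have h := pyRange_map_add 2 (min (M + 1) ((seq.length : Int) - j + 1)) (j - 1)
      rw [show (2 : Int) + (j - 1) = j + 1 by ring,
          show min (M + 1) ((seq.length : Int) - j + 1) + (j - 1)
            = min (j + M) (seq.length : Int) by omega] at h
      exact h
    rw [hrange, List.filter_map, List.map_map, pvRow]
    congr 1
    have hfil : (PySem.List.pyRange 2 (min (M + 1) ((seq.length : Int) - j + 1))).filter
          ((fun k => decide (pvSeg seq j (k + 1) = P)) ∘ fun x => x + (j - 1))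
        = (PySem.List.pyRange 2 (min (M + 1) ((seq.length : Int) - j + 1))).filter
          (fun i => decide (pvSeg seq j (i + j) = P)) := by
      apply List.filter_congr
      intro i _
      simp only [Function.comp]
      rw [show i + (j - 1) + 1 = i + j by ring]
    rw [hfil]
    apply List.map_congr_left
    intro i _
    simp only [Function.comp]
    rw [show i + (j - 1) + 1 = i + j by ring]
  rw [PySem.List.foldl_congr_mem _ _ _ _ (fun out j hj => hbody out j hj)]
  rw [PySem.List.foldl_append_eq_flatMap]
  simp

-- ===== A side =====
theorem A_eq_sorted (seq : List Int) (M P : Int) :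
    getStreakProduct seq M P
      = (PySem.List.sorted
          ((PySem.List.pyRange 2 (M + 1)).flatMap (fun i =>
            ((PySem.List.pyRange 0 ((seq.length : Int) - (i - 1))).filter
                (fun j => decide (pvSeg seq j (i + j) = P))).map
              (fun j => (PySem.List.slice seq (some j) (some (i + j)), j))))
          (fun e => e.2)).map (fun e => e.1) := by
  unfold getStreakProduct
  dsimp only
  congr 2
  have hbody : ∀ (acc : List (List Int × Int)) (i : Int), i ∈ PySem.List.pyRange 2 (M + 1) →
      (PySem.List.pyRange 0 ((seq.length : Int) - (i - 1))).foldl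
        (fun acc j =>
          if (PySem.List.slice seq (some j) (some (i + j))).foldl (fun p num => p * num) 1 = P then
            acc ++ [(PySem.List.slice seq (some j) (some (i + j)), j)]
          else acc) acc
      = acc ++ ((PySem.List.pyRange 0 ((seq.length : Int) - (i - 1))).filter
            (fun j => decide (pvSeg seq j (i + j) = P))).map
          (fun j => (PySem.List.slice seq (some j) (some (i + j)), j)) := by
    intro acc i _
    rw [PySem.List.foldl_append_ite
      (p := fun j => (PySem.List.slice seq (some j) (some (i + j))).foldl (fun p num => p * num) 1 = P)
      (f := fun j => (PySem.List.slice seq (some j) (some (i + j)), j))]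
    congr 2
    apply List.filter_congr
    intro j _
    congr 1
    unfold pvSeg
    rw [List.prod_eq_foldl]
  rw [PySem.List.foldl_congr_mem _ _ _ _ (fun acc i hi => hbody acc i hi)]
  rw [PySem.List.foldl_append_eq_flatMap]
  simp

theorem A_keys (seq : List Int) (M P : Int) :
    ∀ e ∈ (PySem.List.pyRange 2 (M + 1)).flatMap (fun i =>
            ((PySem.List.pyRange 0 ((seq.length : Int) - (i - 1))).filter
                (fun j => decide (pvSeg seq j (i + j) = P))).map
              (fun j => (PySem.List.slice seq (some j) (some (i + j)), j))),
      0 ≤ e.2 ∧ e.2 < (seq.length : Int) := by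
  intro e he
  simp only [List.mem_flatMap, List.mem_map, List.mem_filter] at he
  obtain ⟨i, hi, j, ⟨hjr, _⟩, rfl⟩ := he
  obtain ⟨hi2, _⟩ := PySem.List.mem_pyRange_one.mp hi
  obtain ⟨hj0, hjn⟩ := PySem.List.mem_pyRange_one.mp hjr
  constructor
  · exact hj0
  · simp only
    omega

theorem A_eq_flat (seq : List Int) (M P : Int) :
    getStreakProduct seq M P
      = (List.range seq.length).flatMap (fun (u : Nat) => pvRow seq M P (u : Int)) := by
  rw [A_eq_sorted,
    sorted_key2_eq_buckets seq.length _ (A_keys seq M P)]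
  unfold pvBuckets
  rw [List.map_flatMap]
  apply List.flatMap_congr
  intro u hu
  have hun : u < seq.length := List.mem_range.mp hu
  rw [List.filter_flatMap, List.map_flatMap]
  -- per window size i
  have hper : ∀ i ∈ PySem.List.pyRange 2 (M + 1),
      ((((PySem.List.pyRange 0 ((seq.length : Int) - (i - 1))).filter
            (fun j => decide (pvSeg seq j (i + j) = P))).map
          (fun j => (PySem.List.slice seq (some j) (some (i + j)), j))).filter
        (fun e => e.2 == (u : Int))).map (fun e => e.1)
      = if ((u : Int) < (seq.length : Int) - (i - 1) ∧ pvSeg seq (u : Int) (i + (u : Int)) = P)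
        then [PySem.List.slice seq (some (u : Int)) (some (i + (u : Int)))] else [] := by
    intro i _
    rw [List.filter_map, List.map_map]
    have hcomp : ((fun (e : List Int × Int) => e.2 == (u : Int)) ∘
        (fun j => (PySem.List.slice seq (some j) (some (i + j)), j))) = (fun j => j == (u : Int)) := rfl
    rw [hcomp, List.filter_filter]
    have hswap : (PySem.List.pyRange 0 ((seq.length : Int) - (i - 1))).filter
        (fun j => (j == (u : Int)) && decide (pvSeg seq j (i + j) = P))
        = ((PySem.List.pyRange 0 ((seq.length : Int) - (i - 1))).filter
            (fun j => j == (u : Int))).filter (fun j => decide (pvSeg seq j (i + j) = P)) := by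
      rw [List.filter_filter]
      apply List.filter_congr
      intro j _
      rw [Bool.and_comm]
    rw [hswap, filter_pyRange_eq_single]
    by_cases hin : (0 : Int) ≤ (u : Int) ∧ (u : Int) < (seq.length : Int) - (i - 1)
    · rw [if_pos hin]
      by_cases hc : pvSeg seq (u : Int) (i + (u : Int)) = P
      · rw [if_pos ⟨hin.2, hc⟩]
        simp [hc]
      · rw [if_neg (by tauto)]
        simp [hc]
    · rw [if_neg hin, if_neg (by omega)]
      simp
  rw [List.flatMap_congr hper, flatMap_ite_singleton _
    (fun i => ((u : Int) < (seq.length : Int) - (i - 1) ∧ pvSeg seq (u : Int) (i + (u : Int)) = P))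
    (fun i => PySem.List.slice seq (some (u : Int)) (some (i + (u : Int))))]
  unfold pvRow
  have hbool : ∀ i ∈ PySem.List.pyRange 2 (M + 1),
      (decide ((u : Int) < (seq.length : Int) - (i - 1) ∧ pvSeg seq (u : Int) (i + (u : Int)) = P))
      = ((decide (i < (seq.length : Int) - (u : Int) + 1)) && decide (pvSeg seq (u : Int) (i + (u : Int)) = P)) := by
    intro i _
    by_cases hc : pvSeg seq (u : Int) (i + (u : Int)) = P
    · simp [hc]; omega
    · simp [hc]
  rw [List.filter_congr hbool, filter_pyRange_lt]

-- ===== put them together =====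
theorem pv_main : ∀ (sequence : List Int) (maxSize : Int) (product : Int),
    getStreakProduct sequence maxSize product = getStreakProduct_alt sequence maxSize product := by
  intro seq M P
  rw [A_eq_flat, B_eq_flat, PySem.List.pyRange_zero_natCast, List.flatMap_map]

-- ===== VERDICT (by name: the statement is the Claim_ definition above) =====
theorem getStreakProduct_spec : Claim_equal_getStreakProduct := by
  intro sequence maxSize product _
  unfold Spec_getStreakProduct
  exact pv_main sequence maxSize product
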